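-- pv_equiv track=rewrite | github.com/ahadziha/rewalt | rewal/ogposets.py | _coface_from_face
-- ===== SOURCE A (Python) =====
-- def _coface_from_face(face_data):
--     """
--     Internal method constructing coface data from face data.
--     Face data is presumed to be well-formed.
--     """
--     coface_data = [
--             [
--                 {'-': set(), '+': set()} for _ in n_data
--             ]
--             for n_data in face_data]
--     for n, sn_data in enumerate(face_data[1:]):
--         for k, x in enumerate(sn_data):
--             for sign in '-', '+':
--                 for i in x[sign]:
--                     coface_data[n][i][sign].add(k)
--     return coface_data
-- ===== SOURCE B (Python) =====
-- def _coface_from_face(face_data):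
--     """Gather version: each element pulls its coface sets from the next level."""
--     levels_above = face_data[1:] + [[]]
--     return [
--         [
--             {sign: {k for k, x in enumerate(sup) if i in x[sign]}
--              for sign in ('-', '+')}
--             for i in range(len(n_data))
--         ]
--         for n_data, sup in zip(face_data, levels_above)
--     ]
-- ===== Notes on version B (the rewrite author's own statement) =====
-- stated objective: alternative
-- what changed: Replaced the one-pass scatter (iterate over the super-level and add each index k into the mutable coface sets it points at) by a pure gather: a nested comprehension where every element i of every level collects {k : i in sup[k][sign]} by scanning its super-level, so no mutable output structure is pre-built and updated.
import Mathlib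
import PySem

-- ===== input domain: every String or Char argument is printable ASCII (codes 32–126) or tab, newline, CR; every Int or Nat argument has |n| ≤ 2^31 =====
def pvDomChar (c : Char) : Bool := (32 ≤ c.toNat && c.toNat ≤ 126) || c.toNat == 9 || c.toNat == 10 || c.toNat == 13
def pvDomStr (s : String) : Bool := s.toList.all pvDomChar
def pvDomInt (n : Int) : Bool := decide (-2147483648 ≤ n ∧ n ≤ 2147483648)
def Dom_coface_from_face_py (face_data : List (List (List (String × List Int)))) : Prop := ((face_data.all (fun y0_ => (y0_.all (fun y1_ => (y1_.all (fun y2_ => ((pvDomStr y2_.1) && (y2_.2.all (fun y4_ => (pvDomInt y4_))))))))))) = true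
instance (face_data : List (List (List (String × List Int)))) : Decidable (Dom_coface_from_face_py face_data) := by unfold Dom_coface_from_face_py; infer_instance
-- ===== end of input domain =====

-- B replaces A's single scatter pass (adding each super-element's index into the mutable
-- coface sets it points at) by a pure gather: every element collects its own coface set
-- by scanning the next level; an alternative of similar cost, no speed claim.

-- ===== PORT A =====
-- x[sign]: dict lookup, first match; KeyError (key absent) is excluded by Pre_, modelled by the [] default
def pvDGet (x : List (String × List Int)) (sign : String) : List Int :=
  (PySem.Dict.mk x).getD sign []

-- xs[i] = v-style in-place update with Python index semantics (negative wraps); out of range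
-- (IndexError in Python, excluded by Pre_) is a no-op
def pvSetIdx {α : Type} (xs : List α) (i : Int) (f : α → α) : List α :=
  if 0 ≤ i ∧ i < xs.length then xs.modify i.toNat f
  else if -(xs.length : Int) ≤ i ∧ i < 0 then xs.modify (i + xs.length).toNat f
  else xs

-- coface_data[n][i][sign].add(k): rewrite the value stored at key sign
-- (the key is always present in the entries A itself constructed)
def pvDModify (e : List (String × List Int)) (sign : String) (f : List Int → List Int) :
    List (String × List Int) :=
  e.map (fun p => if p.1 == sign then (p.1, f p.2) else p)

-- 'coface_data[n][i][sign].add(k)', the body of the innermost loop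
def pvA_inner (n k : Int) (sign : String) (cd : List (List (List (String × List Int)))) (i : Int) :
    List (List (List (String × List Int))) :=
  pvSetIdx cd n (fun lvl => pvSetIdx lvl i (fun e => pvDModify e sign (fun s => PySem.Set.add s k)))

-- "for sign in '-', '+': for i in x[sign]: …"
def pvA_signs (n k : Int) (x : List (String × List Int))
    (cd : List (List (List (String × List Int)))) : List (List (List (String × List Int))) :=
  (["-", "+"] : List String).foldl (fun cd sign => (pvDGet x sign).foldl (pvA_inner n k sign) cd) cd

-- "for k, x in enumerate(sn_data): …"
def pvA_level (n : Int) (sn_data : List (List (String × List Int)))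
    (cd : List (List (List (String × List Int)))) : List (List (List (String × List Int))) :=
  (PySem.List.enumerate sn_data 0).foldl (fun cd kx => pvA_signs n kx.1 kx.2 cd) cd

def coface_from_face_py (face_data : List (List (List (String × List Int)))) :
    List (List (List (String × List Int))) :=
  let coface_data := face_data.map (fun n_data =>
    n_data.map (fun _ => [("-", ([] : List Int)), ("+", ([] : List Int))]))
  (PySem.List.enumerate (PySem.List.slice face_data (some 1) none) 0).foldl
    (fun cd nsn => pvA_level nsn.1 nsn.2 cd) coface_data

-- ===== PORT B =====
-- {k for k, x in enumerate(sup) if i in x[sign]}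
def pvGather (sup : List (List (String × List Int))) (sign : String) (i : Int) : List Int :=
  PySem.Set.ofList
    (((PySem.List.enumerate sup 0).filter (fun kx => decide (i ∈ pvDGet kx.2 sign))).map
      (fun kx => kx.1))

def coface_from_face_py_alt (face_data : List (List (List (String × List Int)))) :
    List (List (List (String × List Int))) :=
  let levels_above := PySem.List.slice face_data (some 1) none ++ [[]]
  (face_data.zip levels_above).map (fun p =>
    (PySem.List.pyRange 0 p.1.length 1).map (fun i =>
      (["-", "+"] : List String).map (fun sign => (sign, pvGather p.2 sign i))))

-- ===== PRECONDITION & SPEC =====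
-- Pre_ restricts the dicts of levels 1.. (the only ones A reads) to the well-formed face data the
-- docstring presumes: both '-' and '+' present (else A raises KeyError), every index a genuine
-- position 0 ≤ i < len of the level below (i ≥ len raises IndexError; a negative i only returns
-- via Python's wraparound, outside the natural domain), and keys duplicate-free (an assoc list
-- with duplicate keys has no Python-dict counterpart).
def Pre_coface_from_face_py (face_data : List (List (List (String × List Int)))) : Prop :=
  ∀ p ∈ face_data.zip (face_data.drop 1), ∀ x ∈ p.2,
    (x.map Prod.fst).Nodup ∧ "-" ∈ x.map Prod.fst ∧ "+" ∈ x.map Prod.fst ∧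
    ∀ sg ∈ (["-", "+"] : List String), ∀ i ∈ (PySem.Dict.mk x).getD sg [],
      0 ≤ i ∧ i < (p.1.length : Int)
instance (face_data : List (List (List (String × List Int)))) : Decidable (Pre_coface_from_face_py face_data) := by unfold Pre_coface_from_face_py; infer_instance

def pvWitness_coface_from_face_py : (List (List (List (String × List Int)))) :=
  [[[("-", []), ("+", [])]], [[("-", [0]), ("+", [0])]]]

def Spec_coface_from_face_py (face_data : List (List (List (String × List Int)))) (out : List (List (List (String × List Int)))) : Prop := out = coface_from_face_py_alt face_data
instance (face_data : List (List (List (String × List Int)))) (out : List (List (List (String × List Int)))) : Decidable (Spec_coface_from_face_py face_data out) := by unfold Spec_coface_from_face_py; infer_instance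

-- ===== CLAIM (what is proved, stated in full; the proofs are below) =====
def Claim_equal_coface_from_face_py : Prop := ∀ (face_data : List (List (List (String × List Int)))), Dom_coface_from_face_py face_data → Pre_coface_from_face_py face_data → Spec_coface_from_face_py face_data (coface_from_face_py face_data)

-- ===== LEMMAS AND PROOFS =====

theorem pvSetIdx_length {α : Type} (xs : List α) (i : Int) (f : α → α) :
    (pvSetIdx xs i f).length = xs.length := by
  unfold pvSetIdx; split_ifs <;> simp [List.length_modify]

theorem pvModify_comp {α : Type} (xs : List α) (n : Nat) (f g : α → α) :
    (xs.modify n f).modify n g = xs.modify n (fun a => g (f a)) := by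
  apply List.ext_getElem
  · simp [List.length_modify]
  · intro j h1 h2
    simp only [List.getElem_modify]
    split_ifs <;> rfl

theorem pvModify_id {α : Type} (xs : List α) (n : Nat) :
    xs.modify n (fun a => a) = xs := by
  apply List.ext_getElem
  · simp [List.length_modify]
  · intro j h1 h2
    simp only [List.getElem_modify]
    split_ifs <;> rfl

theorem pvSetIdx_id {α : Type} (xs : List α) (i : Int) :
    pvSetIdx xs i (fun a => a) = xs := by
  unfold pvSetIdx; split_ifs <;> first | rw [pvModify_id] | rfl

theorem pvSetIdx_comp {α : Type} (xs : List α) (i : Int) (f g : α → α) :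
    pvSetIdx (pvSetIdx xs i f) i g = pvSetIdx xs i (fun a => g (f a)) := by
  unfold pvSetIdx
  by_cases h1 : 0 ≤ i ∧ i < (xs.length : Int)
  · simp [h1, List.length_modify, pvModify_comp]
  · by_cases h2 : -(xs.length : Int) ≤ i ∧ i < 0
    · simp [h1, h2, List.length_modify, pvModify_comp]
    · simp [h1, h2]

theorem getD_pvSetIdx_of_nonneg {α : Type} (xs : List α) (i : Int) (hi : 0 ≤ i) (f : α → α)
    (m : Nat) (d : α) :
    (pvSetIdx xs i f).getD m d =
      if (m : Int) = i ∧ m < xs.length then f (xs.getD m d) else xs.getD m d := by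
  unfold pvSetIdx
  by_cases h1 : 0 ≤ i ∧ i < (xs.length : Int)
  · rw [if_pos h1]
    rw [List.getD_eq_getElem?_getD, List.getElem?_modify, List.getD_eq_getElem?_getD]
    by_cases hm : m < xs.length
    · rw [List.getElem?_eq_getElem hm]
      have hnat : (i.toNat = m) ↔ ((m : Int) = i) := by omega
      simp [hnat, hm]
    · rw [List.getElem?_eq_none (by omega)]
      have : ¬((m : Int) = i ∧ m < xs.length) := by omega
      simp [this]
  · have h2 : ¬(-(xs.length : Int) ≤ i ∧ i < 0) := by omega
    rw [if_neg h1, if_neg h2]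
    have hne : ¬((m : Int) = i ∧ m < xs.length) := by omega
    rw [if_neg hne]

-- commute a fold of updates at one fixed outer index out of the outer list
theorem foldl_pvSetIdx_comm {α β : Type} (l : List β) (n : Int) (g : α → β → α)
    (cd : List α) :
    l.foldl (fun cd b => pvSetIdx cd n (fun a => g a b)) cd
      = pvSetIdx cd n (fun a => l.foldl g a) := by
  induction l generalizing cd with
  | nil => simp [pvSetIdx_id]
  | cons b l ih => simp only [List.foldl_cons, ih, pvSetIdx_comp]

-- the reshaped per-superelement step and per-level pass (proof-side only)
def pvStep (k : Int) (x : List (String × List Int))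
    (lvl : List (List (String × List Int))) : List (List (String × List Int)) :=
  (["-", "+"] : List String).foldl
    (fun lvl sign =>
      (pvDGet x sign).foldl
        (fun lvl i => pvSetIdx lvl i (fun e => pvDModify e sign (fun s => PySem.Set.add s k)))
        lvl)
    lvl

def pvProc (sn : List (List (String × List Int)))
    (lvl : List (List (String × List Int))) : List (List (String × List Int)) :=
  (PySem.List.enumerate sn 0).foldl (fun lvl kx => pvStep kx.1 kx.2 lvl) lvl

theorem pvA_level_eq (n : Int) (sn : List (List (String × List Int)))
    (cd : List (List (List (String × List Int)))) :
    pvA_level n sn cd = pvSetIdx cd n (pvProc sn) := by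
  have hsigns : ∀ (k : Int) (x : List (String × List Int))
      (cd : List (List (List (String × List Int)))),
      pvA_signs n k x cd = pvSetIdx cd n (pvStep k x) := by
    intro k x cd
    unfold pvA_signs pvStep pvA_inner
    simp only [List.foldl_cons, List.foldl_nil]
    rw [foldl_pvSetIdx_comm, foldl_pvSetIdx_comm, pvSetIdx_comp]
  unfold pvA_level pvProc
  simp only [hsigns]
  rw [foldl_pvSetIdx_comm]

-- the raw (pre-dedup) gather list
def pvRaw (sn : List (List (String × List Int))) (sign : String) (i : Int) : List Int :=
  ((PySem.List.enumerate sn 0).filter (fun kx => decide (i ∈ pvDGet kx.2 sign))).map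
    (fun kx => kx.1)

theorem pvRaw_mem {sn : List (List (String × List Int))} {sign : String} {i a : Int}
    (h : a ∈ pvRaw sn sign i) : 0 ≤ a ∧ a < (sn.length : Int) := by
  simp only [pvRaw, List.mem_map, List.mem_filter] at h
  obtain ⟨p, ⟨hp, -⟩, rfl⟩ := h
  rw [PySem.List.mem_enumerate_iff] at hp
  obtain ⟨k, hk, rfl⟩ := hp
  refine ⟨by simp, by simpa using hk⟩

theorem pvRaw_nodup (sn : List (List (String × List Int))) (sign : String) (i : Int) :
    (pvRaw sn sign i).Nodup := by
  have h2 : ((PySem.List.enumerate sn 0).filter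
      (fun kx => decide (i ∈ pvDGet kx.2 sign))).Pairwise (fun p q => p.1 < q.1) :=
    List.Pairwise.filter _ (PySem.List.pairwise_lt_enumerate sn 0)
  have h3 : (pvRaw sn sign i).Pairwise (· < ·) := List.pairwise_map.mpr h2
  exact h3.imp (fun h => ne_of_lt h)

theorem pvGather_eq_raw (sn : List (List (String × List Int))) (sign : String) (i : Int) :
    pvGather sn sign i = pvRaw sn sign i :=
  PySem.Set.ofList_eq_self_of_nodup _ (pvRaw_nodup sn sign i)

theorem pvRaw_append (sn : List (List (String × List Int)))
    (x : List (String × List Int)) (sign : String) (i : Int) :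
    pvRaw (sn ++ [x]) sign i
      = pvRaw sn sign i ++ (if i ∈ pvDGet x sign then [(sn.length : Int)] else []) := by
  unfold pvRaw
  rw [PySem.List.enumerate_append]
  by_cases hmem : i ∈ pvDGet x sign <;>
    simp [PySem.List.enumerate_cons, PySem.List.enumerate_nil, List.filter_append, hmem]

-- one sign pass over a level: pointwise effect
theorem foldl_pvSetIdx_level {α : Type} (js : List Int)
    (f : α → α) (hf : ∀ a, f (f a) = f a) (i : Nat) (d : α) :
    ∀ lvl : List α, (∀ j ∈ js, 0 ≤ j) →
    ((js.foldl (fun lvl j => pvSetIdx lvl j f) lvl).getD i d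
      = if (i : Int) ∈ js ∧ i < lvl.length then f (lvl.getD i d) else lvl.getD i d)
    ∧ (js.foldl (fun lvl j => pvSetIdx lvl j f) lvl).length = lvl.length := by
  induction js with
  | nil => intro lvl _; simp
  | cons j rest ih =>
    intro lvl hjs
    simp only [List.foldl_cons]
    obtain ⟨ihg, ihl⟩ := ih (pvSetIdx lvl j f) (fun j h => hjs _ (List.mem_cons_of_mem _ h))
    refine ⟨?_, by rw [ihl, pvSetIdx_length]⟩
    rw [ihg, getD_pvSetIdx_of_nonneg _ _ (hjs j (by simp)), pvSetIdx_length]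
    by_cases hi : i < lvl.length
    · by_cases hj1 : (i : Int) = j <;> by_cases hr : (i : Int) ∈ rest <;>
        simp [hi, hj1, hr, hf, List.mem_cons]
    · simp [hi]

theorem foldl_pvSetIdx_len {α : Type} (js : List Int) (f : α → α) :
    ∀ lvl : List α, (js.foldl (fun lvl j => pvSetIdx lvl j f) lvl).length = lvl.length := by
  induction js with
  | nil => intro lvl; rfl
  | cons j rest ih => intro lvl; simp only [List.foldl_cons]; rw [ih, pvSetIdx_length]

theorem pvStep_length (k : Int) (x : List (String × List Int))
    (lvl : List (List (String × List Int))) : (pvStep k x lvl).length = lvl.length := by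
  unfold pvStep
  simp only [List.foldl_cons, List.foldl_nil]
  rw [foldl_pvSetIdx_len, foldl_pvSetIdx_len]

theorem pvDModify_entry_neg (a b : List Int) (g : List Int → List Int) :
    pvDModify [("-", a), ("+", b)] "-" g = [("-", g a), ("+", b)] := by
  simp [pvDModify]

theorem pvDModify_entry_pos (a b : List Int) (g : List Int → List Int) :
    pvDModify [("-", a), ("+", b)] "+" g = [("-", a), ("+", g b)] := by
  simp [pvDModify]

theorem pvDModify_add_idem (e : List (String × List Int)) (sign : String) (k : Int) :
    pvDModify (pvDModify e sign (fun s => PySem.Set.add s k)) sign (fun s => PySem.Set.add s k)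
      = pvDModify e sign (fun s => PySem.Set.add s k) := by
  unfold pvDModify
  rw [List.map_map]
  apply List.map_congr_left
  intro p _
  by_cases h : p.1 == sign <;>
    simp [h, Function.comp, PySem.Set.add_of_mem, PySem.Set.mem_add]

-- the per-level characterisation: processing the super-level sn on an all-empty level
theorem pvProc_char (sn : List (List (String × List Int)))
    (h0 : ∀ x ∈ sn, ∀ sg ∈ (["-", "+"] : List String), ∀ j ∈ pvDGet x sg, 0 ≤ j) (L : Nat) :
    pvProc sn (List.replicate L ([("-", ([] : List Int)), ("+", ([] : List Int))]))
      = (List.range L).map (fun i : Nat => [("-", pvRaw sn "-" (i : Int)), ("+", pvRaw sn "+" (i : Int))]) := by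
  induction sn using List.reverseRecOn with
  | nil =>
    simp only [pvProc, PySem.List.enumerate_nil, List.foldl_nil, pvRaw, List.filter_nil,
      List.map_nil]
    rw [List.map_const', List.length_range]
  | append_singleton sn x ih =>
    have h0' : ∀ y ∈ sn, ∀ sg ∈ (["-", "+"] : List String), ∀ j ∈ pvDGet y sg, 0 ≤ j :=
      fun y hy => h0 y (by simp [hy])
    have hx : ∀ sg ∈ (["-", "+"] : List String), ∀ j ∈ pvDGet x sg, 0 ≤ j :=
      h0 x (by simp)
    have hstep : pvProc (sn ++ [x])
        (List.replicate L ([("-", ([] : List Int)), ("+", ([] : List Int))]))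
        = pvStep (sn.length : Int) x
            (pvProc sn (List.replicate L ([("-", ([] : List Int)), ("+", ([] : List Int))]))) := by
      unfold pvProc
      rw [PySem.List.enumerate_append]
      simp [PySem.List.enumerate_cons, PySem.List.enumerate_nil]
    rw [hstep, ih h0']
    -- now compute the one scatter step pointwise
    apply List.ext_getElem
    · rw [pvStep_length]; simp
    · intro idx h1 h2
      have hidx : idx < L := by simpa using h2
      have hprevlen :
          ((List.range L).map (fun i : Nat =>
            [("-", pvRaw sn "-" (i : Int)), ("+", pvRaw sn "+" (i : Int))])).length = L := by simp
      -- convert to getD form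
      rw [← List.getD_eq_getElem _ [] h1, ← List.getD_eq_getElem _ [] h2]
      unfold pvStep
      simp only [List.foldl_cons, List.foldl_nil]
      obtain ⟨gneg, lneg⟩ := foldl_pvSetIdx_level (pvDGet x "-")
        (fun e => pvDModify e "-" (fun s => PySem.Set.add s (sn.length : Int)))
        (fun e => pvDModify_add_idem e "-" _) idx []
        ((List.range L).map (fun i : Nat =>
          [("-", pvRaw sn "-" (i : Int)), ("+", pvRaw sn "+" (i : Int))]))
        (hx "-" (by simp))
      obtain ⟨gpos, lpos⟩ := foldl_pvSetIdx_level (pvDGet x "+")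
        (fun e => pvDModify e "+" (fun s => PySem.Set.add s (sn.length : Int)))
        (fun e => pvDModify_add_idem e "+" _) idx []
        ((pvDGet x "-").foldl (fun lvl j => pvSetIdx lvl j
          (fun e => pvDModify e "-" (fun s => PySem.Set.add s (sn.length : Int))))
          ((List.range L).map (fun i : Nat =>
            [("-", pvRaw sn "-" (i : Int)), ("+", pvRaw sn "+" (i : Int))])))
        (hx "+" (by simp))
      rw [gpos, lneg, gneg, hprevlen]
      have hprevget :
          ((List.range L).map (fun i : Nat =>
            [("-", pvRaw sn "-" (i : Int)), ("+", pvRaw sn "+" (i : Int))])).getD idx []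
          = [("-", pvRaw sn "-" (idx : Int)), ("+", pvRaw sn "+" (idx : Int))] := by
        rw [List.getD_eq_getElem?_getD, List.getElem?_map, List.getElem?_range hidx]
        rfl
      rw [hprevget]
      have hknotmem : ∀ sg, ((sn.length : Int)) ∉ pvRaw sn sg (idx : Int) := by
        intro sg hmem
        have := pvRaw_mem hmem
        omega
      have hrhs : ∀ sg, pvRaw (sn ++ [x]) sg (idx : Int)
          = pvRaw sn sg (idx : Int)
            ++ (if (idx : Int) ∈ pvDGet x sg then [(sn.length : Int)] else []) :=
        fun sg => pvRaw_append sn x sg (idx : Int)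
      rw [List.getD_eq_getElem?_getD, List.getElem?_map, List.getElem?_range hidx]
      simp only [Option.map_some, Option.getD_some]
      rw [hrhs "-", hrhs "+"]
      by_cases hm1 : (idx : Int) ∈ pvDGet x "-" <;> by_cases hm2 : (idx : Int) ∈ pvDGet x "+" <;>
        simp [hm1, hm2, hidx, pvDModify_entry_neg, pvDModify_entry_pos,
          PySem.Set.add_of_not_mem (hknotmem "-"), PySem.Set.add_of_not_mem (hknotmem "+")]

-- outer loop: fold of per-level updates at successive indices, pointwise
theorem foldl_outer_char {α β : Type} (F : β → α → α) (db : β) (ls : List β) (cd : List α) :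
    ((PySem.List.enumerate ls 0).foldl (fun cd nsn => pvSetIdx cd nsn.1 (F nsn.2)) cd).length
        = cd.length
    ∧ ∀ (m : Nat) (d : α), m < cd.length →
        ((PySem.List.enumerate ls 0).foldl (fun cd nsn => pvSetIdx cd nsn.1 (F nsn.2)) cd).getD m d
          = if m < ls.length then F (ls.getD m db) (cd.getD m d) else cd.getD m d := by
  induction ls using List.reverseRecOn with
  | nil => simp [PySem.List.enumerate_nil]
  | append_singleton ls x ih =>
    obtain ⟨ihl, ihg⟩ := ih
    rw [PySem.List.enumerate_append]
    simp only [PySem.List.enumerate_cons, PySem.List.enumerate_nil, List.foldl_append,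
      List.foldl_cons, List.foldl_nil]
    refine ⟨by rw [pvSetIdx_length, ihl], ?_⟩
    intro m d hm
    rw [getD_pvSetIdx_of_nonneg _ _ (by omega), ihl, ihg m d hm]
    by_cases hm2 : m < ls.length
    · have h1 : ¬((m : Int) = 0 + ls.length ∧ m < cd.length) := by
        omega
      rw [if_neg h1, if_pos hm2, if_pos (by simp; omega)]
      congr 1
      rw [List.getD_eq_getElem?_getD, List.getD_eq_getElem?_getD,
        List.getElem?_append_left hm2]
    · by_cases hm3 : m = ls.length
      · have h1 : ((m : Int) = 0 + ls.length ∧ m < cd.length) := by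
          omega
        rw [if_pos h1, if_neg hm2, if_pos (by simp; omega)]
        have hgx : (ls ++ [x]).getD m db = x := by
          subst hm3
          simp [List.getD_eq_getElem?_getD]
        rw [hgx]
      · have h1 : ¬((m : Int) = 0 + ls.length ∧ m < cd.length) := by
          omega
        rw [if_neg h1, if_neg hm2, if_neg (by simp; omega)]

theorem coface_main (fd : List (List (List (String × List Int))))
    (hpre : Pre_coface_from_face_py fd) :
    coface_from_face_py fd = coface_from_face_py_alt fd := by
  have hzip : ∀ (m : Nat) (h : m + 1 < fd.length),
      ∀ x ∈ fd[m + 1], ∀ sg ∈ (["-", "+"] : List String), ∀ i ∈ pvDGet x sg,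
        0 ≤ i ∧ i < ((fd[m]'(by omega)).length : Int) := by
    intro m h x hx
    have hlen : m < (fd.zip (fd.drop 1)).length := by
      simp only [List.length_zip, List.length_drop]; omega
    have hmem : (fd[m]'(by omega), fd[m + 1]) ∈ fd.zip (fd.drop 1) := by
      have hg : (fd.zip (fd.drop 1))[m]'hlen
          = (fd[m]'(by omega), (fd.drop 1)[m]'(by simp only [List.length_drop]; omega)) :=
        List.getElem_zip
      have hd : (fd.drop 1)[m]'(by simp only [List.length_drop]; omega) = fd[m + 1] := by
        simp only [List.getElem_drop, Nat.add_comm 1 m]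
      rw [hd] at hg
      exact hg ▸ List.getElem_mem hlen
    have := (hpre _ hmem x hx).2.2.2
    exact this
  unfold coface_from_face_py coface_from_face_py_alt
  simp only [PySem.List.slice_from_one, pvA_level_eq]
  obtain ⟨hAlen, hAget⟩ := foldl_outer_char pvProc ([] : List (List (String × List Int)))
    fd.tail (fd.map (fun n_data => n_data.map (fun _ => [("-", ([] : List Int)), ("+", ([] : List Int))])))
  apply List.ext_getElem
  · rw [hAlen]
    simp only [List.length_map, List.length_zip, List.length_append, List.length_tail,
      List.length_cons, List.length_nil]
    omega
  · intro m h1 h2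
    have hm : m < fd.length := by
      have := h1; rw [hAlen] at this; simpa using this
    rw [← List.getD_eq_getElem _ [] h1, ← List.getD_eq_getElem _ [] h2]
    rw [hAget m [] (by simpa using hm)]
    -- the initial coface_data at level m is an all-empty level of length fd[m].length
    have hcd0 : (fd.map (fun n_data => n_data.map
          (fun _ => [("-", ([] : List Int)), ("+", ([] : List Int))]))).getD m []
        = List.replicate (fd[m]'hm).length [("-", ([] : List Int)), ("+", ([] : List Int))] := by
      rw [List.getD_eq_getElem?_getD, List.getElem?_map, List.getElem?_eq_getElem hm]
      simp [List.map_const']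
    rw [hcd0]
    -- the B side at level m
    have hB : ((fd.zip (fd.tail ++ [[]])).map (fun p =>
          (PySem.List.pyRange 0 p.1.length 1).map (fun i =>
            (["-", "+"] : List String).map (fun sign => (sign, pvGather p.2 sign i))))).getD m []
        = (PySem.List.pyRange 0 (fd[m]'hm).length 1).map (fun i =>
            (["-", "+"] : List String).map (fun sign =>
              (sign, pvGather ((fd.tail ++ [[]]).getD m []) sign i))) := by
      rw [List.getD_eq_getElem?_getD, List.getElem?_map]
      have hmz : m < (fd.zip (fd.tail ++ [[]])).length := by
        simp only [List.length_zip, List.length_append, List.length_tail,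
          List.length_cons, List.length_nil]
        omega
      rw [List.getElem?_eq_getElem hmz, List.getElem_zip]
      have he : (fd.tail ++ [[]])[m]'(by simp only [List.length_append, List.length_tail,
            List.length_cons, List.length_nil]; omega)
          = (fd.tail ++ [[]]).getD m [] := by
        rw [List.getD_eq_getElem _ []]
      simp [he]
    rw [hB]
    have hrange : PySem.List.pyRange 0 ((fd[m]'hm).length : Int) 1
        = (List.range (fd[m]'hm).length).map (fun k : Nat => (k : Int)) := by
      rw [PySem.List.pyRange_of_pos _ _ (by omega)]
      by_cases hL : 0 < (fd[m]'hm).length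
      · simp [hL]
      · simp at hL
        simp [hL]
    by_cases htop : m + 1 < fd.length
    · -- inner level: A processes fd[m+1], B gathers from it
      have htail : fd.tail.getD m [] = fd[m + 1] := by
        rw [List.getD_eq_getElem?_getD, ← List.drop_one, List.getElem?_drop,
          List.getElem?_eq_getElem (by omega : 1 + m < fd.length)]
        simp only [Option.getD_some]
        congr 1
        omega
      have hta : (fd.tail ++ [[]]).getD m [] = fd[m + 1] := by
        rw [List.getD_eq_getElem?_getD,
          List.getElem?_append_left (by simp only [List.length_tail]; omega),
          ← List.getD_eq_getElem?_getD, htail]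
      rw [if_pos (show m < fd.tail.length by simp only [List.length_tail]; omega), htail, hta]
      rw [pvProc_char _ (fun x hx sg hsg j hj => (hzip m htop x hx sg hsg j hj).1) _]
      rw [hrange, List.map_map]
      apply List.map_congr_left
      intro k hk
      simp only [Function.comp_def, List.map_cons, List.map_nil, pvGather_eq_raw]
    · -- top level: no cofaces on either side
      have hta : (fd.tail ++ [[]]).getD m [] = [] := by
        rcases Nat.lt_or_ge m (fd.tail.length) with hlt | hge
        · exfalso; simp only [List.length_tail] at hlt; omega
        · rw [List.getD_eq_getElem?_getD, List.getElem?_append_right hge]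
          have : m - fd.tail.length = 0 := by simp only [List.length_tail]; omega
          rw [this]
          rfl
      rw [if_neg (show ¬ m < fd.tail.length by simp only [List.length_tail]; omega), hta]
      have hg : ∀ sg (i : Int), pvGather [] sg i = [] := by
        intro sg i
        simp [pvGather, PySem.List.enumerate_nil, PySem.Set.ofList]
      rw [hrange, List.map_map]
      simp only [Function.comp_def, hg, List.map_cons, List.map_nil]
      rw [List.map_const', List.length_range]

-- ===== VERDICT (by name: the statement is the Claim_ definition above) =====
theorem coface_from_face_py_spec : Claim_equal_coface_from_face_py := by
  intro fd _ hpre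
  unfold Spec_coface_from_face_py
  exact coface_main fd hpre
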